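-- pv_equiv track=rewrite | github.com/osbornepeter544-a11y/crime-bot | app/subtitles/subtitle_segmenter.py | split_by_word_limit
-- ===== SOURCE A (Python) =====
-- from typing import Dict, List
--
-- def split_by_word_limit(sentence: str, max_words: int) -> List[str]:
--     words = sentence.split()
--     lines = []
--     current = []
--
--     for word in words:
--         current.append(word)
--
--         if len(current) >= max_words:
--             lines.append(" ".join(current))
--             current = []
--
--     if current:
--         lines.append(" ".join(current))
--
--     return lines
-- ===== SOURCE B (Python) =====
-- def split_by_word_limit(sentence: str, max_words: int):
--     words = sentence.split()
--     k = max(max_words, 1)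
--     return [" ".join(words[i:i + k]) for i in range(0, len(words), k)]
-- ===== Notes on version B (the rewrite author's own statement) =====
-- stated objective: idiomatic
-- what changed: Replaces the stateful accumulate-and-flush word loop by an index-striding slice comprehension over range(0, len(words), k), with the chunk size clamped to at least 1 (which reproduces A's one-word-per-line behaviour for non-positive max_words).
import Mathlib
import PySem

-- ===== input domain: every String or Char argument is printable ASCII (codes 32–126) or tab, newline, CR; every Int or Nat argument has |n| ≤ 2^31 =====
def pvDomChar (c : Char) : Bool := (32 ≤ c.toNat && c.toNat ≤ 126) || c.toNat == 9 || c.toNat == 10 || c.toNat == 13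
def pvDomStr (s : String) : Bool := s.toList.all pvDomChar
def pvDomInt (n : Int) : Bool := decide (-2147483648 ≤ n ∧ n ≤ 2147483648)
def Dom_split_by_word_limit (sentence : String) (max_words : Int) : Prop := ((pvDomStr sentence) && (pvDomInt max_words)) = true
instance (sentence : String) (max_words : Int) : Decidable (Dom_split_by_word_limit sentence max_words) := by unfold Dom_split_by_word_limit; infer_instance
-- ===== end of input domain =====

-- B replaces A's stateful accumulate-and-flush loop by an index-striding slice chunking (chunk size clamped to ≥ 1); same result, idiomatic decomposition.


-- ===== PORT A =====
-- one iteration of A's for-loop: append the word to `current`, flush when len(current) >= max_words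
def stepA (max_words : Int) (st : List String × List String) (word : String) : List String × List String :=
  let current := st.2 ++ [word]
  if (current.length : Int) ≥ max_words then (st.1 ++ [PySem.Str.join " " current], [])
  else (st.1, current)

def split_by_word_limit (sentence : String) (max_words : Int) : List String :=
  let words := PySem.Str.split₀ sentence
  let st := words.foldl (stepA max_words) ([], [])
  if st.2 ≠ [] then st.1 ++ [PySem.Str.join " " st.2] else st.1

-- ===== PORT B =====
def split_by_word_limit_alt (sentence : String) (max_words : Int) : List String :=
  let words := PySem.Str.split₀ sentence
  let k := max max_words 1
  (PySem.List.pyRange 0 (words.length : Int) k).map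
    (fun i => PySem.Str.join " " (PySem.List.slice words (some i) (some (i + k))))

-- ===== PRECONDITION & SPEC =====
def Spec_split_by_word_limit (sentence : String) (max_words : Int) (out : List String) : Prop := out = split_by_word_limit_alt sentence max_words
instance (sentence : String) (max_words : Int) (out : List String) : Decidable (Spec_split_by_word_limit sentence max_words out) := by unfold Spec_split_by_word_limit; infer_instance

-- ===== CLAIM (what is proved, stated in full; the proofs are below) =====
def Claim_equal_split_by_word_limit : Prop := ∀ (sentence : String) (max_words : Int), Dom_split_by_word_limit sentence max_words → Spec_split_by_word_limit sentence max_words (split_by_word_limit sentence max_words)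

-- ===== LEMMAS AND PROOFS =====

-- proof-only common form: greedy chunking of the word list into blocks of kn words
def chunksR (kn : Nat) (words : List String) : List String :=
  if h : words = [] ∨ kn = 0 then [] else
    PySem.Str.join " " (words.take kn) :: chunksR kn (words.drop kn)
termination_by words.length
decreasing_by
  simp only [not_or] at h
  have h1 : words.length ≠ 0 := fun hh => h.1 (List.eq_nil_of_length_eq_zero hh)
  have h2 : kn ≠ 0 := h.2
  simp only [List.length_drop]
  omega

theorem chunksR_nil (kn : Nat) : chunksR kn [] = [] := by
  rw [chunksR]; simp

theorem pyRange_pos_cons (a b k : Int) (hk : 0 < k) (hab : a < b) :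
    PySem.List.pyRange a b k = a :: PySem.List.pyRange (a + k) b k := by
  rw [PySem.List.pyRange_of_pos a b hk, PySem.List.pyRange_of_pos (a + k) b hk]
  have hd : (0 : Int) ≤ b - a - 1 := by omega
  have hq0 : 0 ≤ (b - a - 1) / k := Int.ediv_nonneg hd (le_of_lt hk)
  have hdiv : (b - a + k - 1) / k = (b - a - 1) / k + 1 := by
    have h := Int.add_mul_ediv_right (b - a - 1) 1 (by omega : k ≠ 0)
    have e : b - a + k - 1 = b - a - 1 + 1 * k := by ring
    rw [e, h]
  have hm2 : (if a + k < b then ((b - (a + k) + k - 1) / k).toNat else 0)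
      = ((b - a - 1) / k).toNat := by
    split
    · have e : b - (a + k) + k - 1 = b - a - 1 := by ring
      rw [e]
    · have hlt : b - a - 1 < k := by omega
      have h0 : (b - a - 1) / k = 0 := Int.ediv_eq_zero_of_lt hd hlt
      simp [h0]
  have hm1 : (if a < b then ((b - a + k - 1) / k).toNat else 0)
      = ((b - a - 1) / k).toNat + 1 := by
    simp only [hab, if_true, hdiv]
    omega
  rw [hm1, hm2, List.range_succ_eq_map]
  simp only [List.map_cons, List.map_map]
  refine congrArg₂ _ ?_ ?_
  · simp
  · apply List.map_congr_left
    intro j _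
    simp only [Function.comp_apply]
    push_cast
    ring

theorem pyRange_pos_shift (a b k : Int) (hk : 0 < k) :
    PySem.List.pyRange (a + k) b k = (PySem.List.pyRange a (b - k) k).map (· + k) := by
  rw [PySem.List.pyRange_of_pos _ _ hk, PySem.List.pyRange_of_pos _ _ hk, List.map_map]
  rw [if_congr (show a + k < b ↔ a < b - k by omega) rfl rfl]
  have e : b - (a + k) + k - 1 = b - k - a + k - 1 := by ring
  rw [e]
  apply List.map_congr_left
  intro j _
  simp only [Function.comp_apply]
  ring

theorem B_eq_chunks : ∀ (n : Nat) (words : List String) (k : Int), words.length = n → 1 ≤ k →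
    (PySem.List.pyRange 0 (words.length : Int) k).map
      (fun i => PySem.Str.join " " (PySem.List.slice words (some i) (some (i + k))))
      = chunksR k.toNat words := by
  intro n
  induction n using Nat.strong_induction_on with
  | _ n ih =>
    intro words k hn hk
    by_cases hw : words = []
    · subst hw
      rw [PySem.List.pyRange_of_pos _ _ (by omega : (0:Int) < k)]
      simp [chunksR_nil]
    · have hn0 : 0 < words.length := List.length_pos_of_ne_nil hw
      have hkn0 : k.toNat ≠ 0 := by omega
      rw [pyRange_pos_cons 0 _ k (by omega) (by exact_mod_cast hn0),
          pyRange_pos_shift 0 _ k (by omega), List.map_cons, List.map_map]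
      rw [chunksR]
      simp only [hw, hkn0, or_self, dite_false, false_or]
      refine congrArg₂ _ ?_ ?_
      · -- head: words[0:0+k] = take k.toNat words
        have h0k : (0 : Int) ≤ 0 + k := by omega
        rw [PySem.List.slice_toNat words (by omega) h0k]
        congr 1
        simp
      · -- tail
        by_cases hle : (words.length : Int) ≤ k
        · -- remaining range is empty and the dropped list is empty
          have hnb : ¬ ((0:Int) < (words.length : Int) - k) := by omega
          have hdrop : words.drop k.toNat = [] := by
            apply List.drop_eq_nil_of_le
            omega
          rw [PySem.List.pyRange_of_pos _ _ (by omega : (0:Int) < k), if_neg hnb,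
              hdrop, chunksR_nil]
          simp
        · have hlt : k.toNat < words.length := by omega
          have hlen : (words.drop k.toNat).length = words.length - k.toNat := by
            simp [List.length_drop]
          have hcast : ((words.drop k.toNat).length : Int) = (words.length : Int) - k := by
            rw [hlen]; push_cast; omega
          rw [← hcast]
          rw [List.map_congr_left (l := PySem.List.pyRange 0 ((words.drop k.toNat).length : Int) k)
            (g := fun i => PySem.Str.join " " (PySem.List.slice (words.drop k.toNat) (some i) (some (i + k))))
            ?_]
          · exact ih (words.drop k.toNat).length (by omega) _ k rfl hk
          · intro i hi
            have hi0 : 0 ≤ i := ((PySem.List.mem_pyRange_iff_of_pos (by omega) i).mp hi).1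
            simp only [Function.comp_apply]
            congr 1
            rw [PySem.List.slice_toNat words (by omega : (0:Int) ≤ i + k) (by omega),
                PySem.List.slice_toNat (words.drop k.toNat) hi0 (by omega)]
            rw [List.drop_drop]
            congr 1
            · omega
            · congr 1
              omega

theorem A_inv (mw : Int) : ∀ (words lines current : List String),
    ((current.length : Int) < max mw 1) →
    (let st := words.foldl (stepA mw) (lines, current);
     if st.2 ≠ [] then st.1 ++ [PySem.Str.join " " st.2] else st.1)
      = lines ++ chunksR (max mw 1).toNat (current ++ words) := by
  intro words
  induction words with
  | nil =>
    intro lines current hc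
    simp only [List.foldl_nil, List.append_nil]
    by_cases h : current = []
    · subst h; simp [chunksR_nil]
    · have hlen : current.length < (max mw 1).toNat := by omega
      rw [chunksR]
      simp only [h, (by omega : (max mw 1).toNat ≠ 0), or_self, dite_false, false_or]
      rw [List.take_of_length_le (by omega), List.drop_eq_nil_of_le (by omega), chunksR_nil]
      simp [h]
  | cons w ws ih =>
    intro lines current hc
    simp only [List.foldl_cons]
    by_cases hflush : ((current ++ [w]).length : Int) ≥ mw
    · have hflu : mw ≤ (current.length : Int) + 1 := by
        have h := hflush
        simp only [ge_iff_le, List.length_append, List.length_cons, List.length_nil] at h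
        push_cast at h
        omega
      have hcl : (current ++ [w]).length = (max mw 1).toNat := by
        simp only [List.length_append, List.length_cons, List.length_nil]
        omega
      have hstep : stepA mw (lines, current) w
          = (lines ++ [PySem.Str.join " " (current ++ [w])], ([] : List String)) := by
        simp only [stepA]
        rw [if_pos hflush]
      have h0 : (([] : List String).length : Int) < max mw 1 := by
        simp only [List.length_nil]
        omega
      rw [hstep, ih (lines ++ [PySem.Str.join " " (current ++ [w])]) [] h0,
          show current ++ w :: ws = (current ++ [w]) ++ ws from by simp]
      simp only [List.nil_append]
      conv_rhs => rw [chunksR]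
      rw [dif_neg (not_or.mpr ⟨by simp, by omega⟩)]
      rw [List.take_left' hcl, List.drop_left' hcl]
      simp
    · have hflu : (current.length : Int) + 1 < mw := by
        have h := hflush
        simp only [ge_iff_le, not_le, List.length_append, List.length_cons, List.length_nil] at h
        push_cast at h
        omega
      have hc' : (((current ++ [w]).length : Int) < max mw 1) := by
        simp only [List.length_append, List.length_cons, List.length_nil]
        push_cast
        omega
      have hstep : stepA mw (lines, current) w = (lines, current ++ [w]) := by
        simp only [stepA]
        rw [if_neg hflush]
      rw [hstep, ih lines (current ++ [w]) hc',
          show current ++ w :: ws = (current ++ [w]) ++ ws from by simp]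

-- ===== VERDICT (by name: the statement is the Claim_ definition above) =====
theorem split_by_word_limit_spec : Claim_equal_split_by_word_limit := by
  intro sentence max_words _
  show split_by_word_limit sentence max_words = split_by_word_limit_alt sentence max_words
  unfold split_by_word_limit split_by_word_limit_alt
  rw [A_inv max_words (PySem.Str.split₀ sentence) [] [] (by simp only [List.length_nil]; omega)]
  rw [B_eq_chunks (PySem.Str.split₀ sentence).length (PySem.Str.split₀ sentence) (max max_words 1) rfl (le_max_right _ _)]
  simp
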